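-- pv_equiv track=rewrite | github.com/berayboztepe/Find_Best_fit_Polynomial | 180401026_vize_en.py | calculate_xi_yi_sums
-- ===== SOURCE A (Python) =====
-- def calculate_xi_yi_sums(lst, n):
--     xi_yi_values = []
--     for i in range(7):
--         xi_yi_sum = 0
--         for k in range(n):
--             xi_yi_sum += ((k + 1)**i) * lst[k]
--         xi_yi_values.append(xi_yi_sum)
--     return xi_yi_values
-- ===== SOURCE B (Python) =====
-- def calculate_xi_yi_sums(lst, n):
--     sums = [0] * 7
--     for k in range(n):
--         v = lst[k]
--         p = 1
--         for i in range(7):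
--             sums[i] += p * v
--             p *= (k + 1)
--     return sums
-- ===== Notes on version B (the rewrite author's own statement) =====
-- stated objective: alternative
-- what changed: Replaces seven independent scans of lst (each recomputing (k+1)**i) with a single pass maintaining seven accumulators and an incrementally multiplied power.
import Mathlib
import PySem

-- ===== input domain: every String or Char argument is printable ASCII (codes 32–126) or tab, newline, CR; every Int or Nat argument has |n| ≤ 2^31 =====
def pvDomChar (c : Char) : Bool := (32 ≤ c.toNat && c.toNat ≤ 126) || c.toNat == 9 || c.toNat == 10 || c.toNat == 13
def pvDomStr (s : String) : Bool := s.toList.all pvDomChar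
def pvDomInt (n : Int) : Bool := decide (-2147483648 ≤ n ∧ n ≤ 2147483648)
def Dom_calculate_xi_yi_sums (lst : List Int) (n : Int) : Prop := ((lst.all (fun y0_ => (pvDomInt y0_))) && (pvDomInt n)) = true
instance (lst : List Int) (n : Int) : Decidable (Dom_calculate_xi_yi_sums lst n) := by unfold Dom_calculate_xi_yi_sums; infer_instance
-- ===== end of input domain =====

-- B makes one pass over lst with seven maintained accumulators instead of A's seven scans; equal on Pre_ (where A does not raise IndexError).

-- ===== PORT A =====
-- for i in range(7): xi_yi_sum = fold over range(n) of ((k+1)**i)*lst[k]; append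
def calculate_xi_yi_sums (lst : List Int) (n : Int) : List Int :=
  (PySem.List.pyRange 0 7 1).foldl
    (fun xi_yi_values i =>
      xi_yi_values ++
        [(PySem.List.pyRange 0 n 1).foldl
          (fun xi_yi_sum k => xi_yi_sum + ((k + 1) ^ i.toNat) * PySem.List.pyGetD lst k 0) 0])
    []

-- ===== PORT B =====
-- one pass: for k in range(n): v = lst[k]; p = 1; for i in range(7): sums[i] += p*v; p *= (k+1)
def calculate_xi_yi_sums_alt (lst : List Int) (n : Int) : List Int :=
  (PySem.List.pyRange 0 n 1).foldl
    (fun sums k =>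
      let v := PySem.List.pyGetD lst k 0
      ((PySem.List.pyRange 0 7 1).foldl
        (fun (st : List Int × Int) i =>
          (st.1 ++ [sums.getD i.toNat 0 + st.2 * v], st.2 * (k + 1)))
        ([], 1)).1)
    [0, 0, 0, 0, 0, 0, 0]

-- ===== PRECONDITION & SPEC =====
-- Pre_ excludes exactly the inputs where Python A raises IndexError (n exceeding len(lst)).
def Pre_calculate_xi_yi_sums (lst : List Int) (n : Int) : Prop := n ≤ (lst.length : Int)
instance (lst : List Int) (n : Int) : Decidable (Pre_calculate_xi_yi_sums lst n) := by unfold Pre_calculate_xi_yi_sums; infer_instance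
def pvWitness_calculate_xi_yi_sums : List Int × Int := ([2, -3, 5], 3)

def Spec_calculate_xi_yi_sums (lst : List Int) (n : Int) (out : List Int) : Prop := out = calculate_xi_yi_sums_alt lst n
instance (lst : List Int) (n : Int) (out : List Int) : Decidable (Spec_calculate_xi_yi_sums lst n out) := by unfold Spec_calculate_xi_yi_sums; infer_instance

-- ===== CLAIM (what is proved, stated in full; the proofs are below) =====
def Claim_equal_calculate_xi_yi_sums : Prop := ∀ (lst : List Int) (n : Int), Dom_calculate_xi_yi_sums lst n → Pre_calculate_xi_yi_sums lst n → Spec_calculate_xi_yi_sums lst n (calculate_xi_yi_sums lst n)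

-- ===== LEMMAS AND PROOFS =====

-- A's inner sum for exponent i, up to bound m
def pvInner (lst : List Int) (i : Nat) (m : Int) : Int :=
  (PySem.List.pyRange 0 m 1).foldl
    (fun s k => s + ((k + 1) ^ i) * PySem.List.pyGetD lst k 0) 0

theorem pvA_eq (lst : List Int) (n : Int) :
    calculate_xi_yi_sums lst n =
      [pvInner lst 0 n, pvInner lst 1 n, pvInner lst 2 n, pvInner lst 3 n,
       pvInner lst 4 n, pvInner lst 5 n, pvInner lst 6 n] := by
  have h7 : PySem.List.pyRange 0 7 1 = [0, 1, 2, 3, 4, 5, 6] := by decide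
  simp [calculate_xi_yi_sums, h7, pvInner, List.foldl]

theorem pvInner_step (lst : List Int) (i : Nat) (m : Int) (hm : 0 ≤ m) :
    pvInner lst i (m + 1) = pvInner lst i m + ((m + 1) ^ i) * PySem.List.pyGetD lst m 0 := by
  unfold pvInner
  rw [PySem.List.pyRange_one_succ_right hm, List.foldl_append]
  rfl

-- B's fold invariant: after processing range(m), the accumulator is the seven inner sums up to m
theorem pvB_inv (lst : List Int) (m : Nat) :
    (PySem.List.pyRange 0 (m : Int) 1).foldl
      (fun sums k =>
        let v := PySem.List.pyGetD lst k 0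
        ((PySem.List.pyRange 0 7 1).foldl
          (fun (st : List Int × Int) i =>
            (st.1 ++ [sums.getD i.toNat 0 + st.2 * v], st.2 * (k + 1)))
          ([], 1)).1)
      [0, 0, 0, 0, 0, 0, 0] =
    [pvInner lst 0 m, pvInner lst 1 m, pvInner lst 2 m, pvInner lst 3 m,
     pvInner lst 4 m, pvInner lst 5 m, pvInner lst 6 m] := by
  induction m with
  | zero =>
      simp [PySem.List.pyRange_one_eq_nil, pvInner]
  | succ m ih =>
      have hm : (0 : Int) ≤ (m : Int) := by positivity
      have hcast : ((m + 1 : Nat) : Int) = (m : Int) + 1 := by push_cast; ring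
      rw [hcast, PySem.List.pyRange_one_succ_right hm, List.foldl_append, ih]
      have h7 : PySem.List.pyRange 0 7 1 = [0, 1, 2, 3, 4, 5, 6] := by decide
      simp only [List.foldl, h7, List.getD]
      norm_num [pvInner_step lst _ _ hm]
      refine ⟨?_, ?_, ?_, ?_, ?_⟩ <;>
      · norm_num [show ((2:Int)).toNat = 2 from rfl, show ((3:Int)).toNat = 3 from rfl,
          show ((4:Int)).toNat = 4 from rfl, show ((5:Int)).toNat = 5 from rfl,
          show ((6:Int)).toNat = 6 from rfl]
        left; ring

theorem pvMain (lst : List Int) (n : Int) :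
    calculate_xi_yi_sums lst n = calculate_xi_yi_sums_alt lst n := by
  rcases le_or_gt n 0 with hn | hn
  · have h0 : PySem.List.pyRange 0 n 1 = [] := PySem.List.pyRange_one_eq_nil hn
    rw [pvA_eq]
    simp [calculate_xi_yi_sums_alt, h0, pvInner]
  · obtain ⟨m, rfl⟩ : ∃ m : Nat, n = (m : Int) :=
      ⟨n.toNat, (Int.toNat_of_nonneg hn.le).symm⟩
    rw [pvA_eq, calculate_xi_yi_sums_alt, pvB_inv]

-- ===== VERDICT (by name: the statement is the Claim_ definition above) =====
theorem calculate_xi_yi_sums_spec : Claim_equal_calculate_xi_yi_sums := by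
  intro lst n _ _
  exact pvMain lst n
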